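-- pv_equiv track=rewrite | github.com/twistedfall/opencv-rust | gen_rust.py | split_known_namespace
-- ===== SOURCE A (Python) =====
-- def split_known_namespace(name, namespaces):
--     """
--     :type name: str
--     :type namespaces: iterable
--     :rtype: (str, str)
--     """
--     if "::" in name:
--         for namespace in sorted(namespaces, key=len, reverse=True):
--             namespace_colon = namespace + "::"
--             if name.startswith(namespace_colon):
--                 return namespace, name[len(namespace_colon):]
--         return "", name
--     else:
--         return "", name
-- ===== SOURCE B (Python) =====
-- def split_known_namespace(name, namespaces):
--     """
--     :type name: str
--     :type namespaces: iterable
--     :rtype: (str, str)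
--     """
--     best = None
--     for namespace in namespaces:
--         if (best is None or len(best) < len(namespace)) and name.startswith(namespace + "::"):
--             best = namespace
--     if best is None:
--         return "", name
--     return best, name[len(best) + 2:]
-- ===== Notes on version B (the rewrite author's own statement) =====
-- stated objective: alternative
-- what changed: Replaces A's sort-namespaces-by-length-descending-then-return-first-prefix-match (plus a separate '::'-substring pre-check) with a single unsorted accumulator pass that keeps the longest namespace whose 'ns::' prefixes the name; matching prefixes of equal length are identical strings, so the result is the same.
import Mathlib
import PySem

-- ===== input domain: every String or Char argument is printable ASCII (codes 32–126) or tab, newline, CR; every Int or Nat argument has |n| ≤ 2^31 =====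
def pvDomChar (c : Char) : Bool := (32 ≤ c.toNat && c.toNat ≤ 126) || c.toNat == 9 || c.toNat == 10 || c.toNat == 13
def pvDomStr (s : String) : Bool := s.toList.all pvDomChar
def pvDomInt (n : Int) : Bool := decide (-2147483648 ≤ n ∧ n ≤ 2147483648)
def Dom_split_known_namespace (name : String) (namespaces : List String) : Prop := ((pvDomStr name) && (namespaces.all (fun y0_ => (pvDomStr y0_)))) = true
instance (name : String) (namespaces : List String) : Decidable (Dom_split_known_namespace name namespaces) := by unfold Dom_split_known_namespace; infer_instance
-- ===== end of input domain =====

-- B is a single accumulator pass (keep the longest namespace whose "ns::" prefixes name)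
-- instead of A's sort-by-length-then-first-match; equality of return values is proved below.

-- ===== PORT A =====
-- the for-loop over the sorted list: first namespace whose "ns::" prefixes name wins
def sknLoop (name : String) : List String → String × String
  | [] => ("", name)
  | ns :: rest =>
    let namespace_colon := ns ++ "::"
    if PySem.Str.startswith name namespace_colon then
      (ns, PySem.Str.slice name (some (PySem.Str.len namespace_colon)) none)
    else sknLoop name rest

def split_known_namespace (name : String) (namespaces : List String) : String × String :=
  if PySem.Str.isIn "::" name then
    sknLoop name (PySem.List.sorted namespaces (fun ns => PySem.Str.len ns) (reverse := true))
  else ("", name)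

-- ===== PORT B =====
-- loop body: keep `best`, replace it by ns when ns is strictly longer and "ns::" prefixes name
def bStep (name : String) (best : Option String) (ns : String) : Option String :=
  if (match best with
      | none => true
      | some b => decide (PySem.Str.len b < PySem.Str.len ns))
     && PySem.Str.startswith name (ns ++ "::") then some ns else best

def split_known_namespace_alt (name : String) (namespaces : List String) : String × String :=
  match namespaces.foldl (bStep name) none with
  | none => ("", name)
  | some b => (b, PySem.Str.slice name (some (PySem.Str.len b + 2)) none)

-- ===== PRECONDITION & SPEC =====
def Spec_split_known_namespace (name : String) (namespaces : List String) (out : String × String) : Prop := out = split_known_namespace_alt name namespaces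
instance (name : String) (namespaces : List String) (out : String × String) : Decidable (Spec_split_known_namespace name namespaces out) := by unfold Spec_split_known_namespace; infer_instance

-- ===== CLAIM (what is proved, stated in full; the proofs are below) =====
def Claim_equal_split_known_namespace : Prop := ∀ (name : String) (namespaces : List String), Dom_split_known_namespace name namespaces → Spec_split_known_namespace name namespaces (split_known_namespace name namespaces)

-- ===== LEMMAS AND PROOFS =====

-- "ns is a match": name starts with ns ++ "::"
def pMatch (name ns : String) : Prop := (ns.toList ++ [':', ':']) <+: name.toList

theorem startswith_iff_pMatch (name ns : String) :
    PySem.Str.startswith name (ns ++ "::") = true ↔ pMatch name ns := by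
  simp [PySem.Str.startswith_eq, PySem.Chars.startswith_iff, pMatch]

-- two matches of equal length are the same string
theorem pMatch_uniq {name x y : String} (hx : pMatch name x) (hy : pMatch name y)
    (hlen : x.toList.length = y.toList.length) : x = y := by
  unfold pMatch at hx hy
  have h : x.toList ++ [':', ':'] = y.toList ++ [':', ':'] :=
    (List.prefix_of_prefix_length_le hx hy (by simp [hlen])).eq_of_length (by simp [hlen])
  exact String.toList_injective (List.append_inj_left h (by simp [hlen]))

-- a match forces "::" to occur in name
theorem isIn_of_pMatch {name m : String} (hm : pMatch name m) :
    PySem.Str.isIn "::" name = true := by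
  rw [PySem.Str.isIn_iff_infix]
  have h1 : ("::" : String).toList <:+: (m.toList ++ [':', ':']) :=
    (List.suffix_append _ _).isInfix
  exact h1.trans hm.isInfix

-- A's loop returns ("", name) when nothing matches
theorem sknLoop_none (name : String) (l : List String)
    (h : ∀ ns ∈ l, ¬ pMatch name ns) : sknLoop name l = ("", name) := by
  induction l with
  | nil => rfl
  | cons ns rest ih =>
    simp only [sknLoop]
    rw [if_neg (by simp only [startswith_iff_pMatch]; exact h ns (by simp))]
    exact ih (fun x hx => h x (by simp [hx]))

-- A's loop on a length-descending list returns the (unique) maximal match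
theorem sknLoop_max (name m : String) (hm : pMatch name m)
    (huniq : ∀ x, pMatch name x → x.toList.length = m.toList.length → x = m) :
    ∀ l : List String, m ∈ l →
      (∀ x ∈ l, pMatch name x → x.toList.length ≤ m.toList.length) →
      l.Pairwise (fun a b => b.toList.length ≤ a.toList.length) →
      sknLoop name l = (m, PySem.Str.slice name (some (PySem.Str.len m + 2)) none) := by
  intro l
  induction l with
  | nil => intro h; simp at h
  | cons ns rest ih =>
    intro hmem hmax hpw
    rw [List.pairwise_cons] at hpw
    by_cases hns : pMatch name ns
    · -- the head matches: it must be m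
      have h1 : ns.toList.length ≤ m.toList.length := hmax ns (by simp) hns
      have h2 : m.toList.length ≤ ns.toList.length := by
        rcases List.mem_cons.mp hmem with h | h
        · simp [h]
        · exact hpw.1 m h
      have hnm : ns = m := huniq ns hns (le_antisymm h1 h2)
      subst hnm
      simp only [sknLoop]
      rw [if_pos (by rw [startswith_iff_pMatch]; exact hns)]
      simp [PySem.Str.len_eq]
    · -- the head does not match: m is in the tail
      have hne : ns ≠ m := fun h => hns (h ▸ hm)
      have hmt : m ∈ rest := by
        rcases List.mem_cons.mp hmem with h | h
        · exact absurd h.symm hne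
        · exact h
      simp only [sknLoop]
      rw [if_neg (by simp only [startswith_iff_pMatch]; exact hns)]
      exact ih hmt (fun x hx => hmax x (by simp [hx])) hpw.2

-- B's fold stays `none` when nothing matches
theorem foldB_none (name : String) (l : List String)
    (h : ∀ ns ∈ l, ¬ pMatch name ns) : l.foldl (bStep name) none = none := by
  induction l with
  | nil => rfl
  | cons ns rest ih =>
    have hstep : bStep name none ns = none := by
      unfold bStep
      rw [if_neg]
      simp only [Bool.true_and, startswith_iff_pMatch]
      exact h ns (by simp)
    rw [List.foldl_cons, hstep]
    exact ih (fun x hx => h x (by simp [hx]))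

-- once `best = some m` with m maximal, the fold keeps it
theorem foldB_keep (name m : String) (l : List String)
    (hmax : ∀ x ∈ l, pMatch name x → x.toList.length ≤ m.toList.length) :
    l.foldl (bStep name) (some m) = some m := by
  induction l with
  | nil => rfl
  | cons ns rest ih =>
    have hstep : bStep name (some m) ns = some m := by
      unfold bStep
      rw [if_neg]
      intro hc
      rw [Bool.and_eq_true, decide_eq_true_iff, startswith_iff_pMatch] at hc
      have h1 := hmax ns (by simp) hc.2
      have h2 : m.toList.length < ns.toList.length := by
        have := hc.1
        simpa [PySem.Str.len_eq, String.length_toList] using this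
      omega
    rw [List.foldl_cons, hstep]
    exact ih (fun x hx hp => hmax x (by simp [hx]) hp)

-- the fold reaches the maximal match m
theorem foldB_reach (name m : String) (hm : pMatch name m)
    (huniq : ∀ x, pMatch name x → x.toList.length = m.toList.length → x = m) :
    ∀ (l : List String) (acc : Option String), m ∈ l →
      (∀ x ∈ l, pMatch name x → x.toList.length ≤ m.toList.length) →
      (acc = none ∨ ∃ b, acc = some b ∧ pMatch name b ∧ b.toList.length ≤ m.toList.length) →
      l.foldl (bStep name) acc = some m := by
  intro l
  induction l with
  | nil => intro acc h; simp at h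
  | cons ns rest ih =>
    intro acc hmem hmax hacc
    by_cases hmt : m ∈ rest
    · -- invariant is preserved by one step, recurse
      rw [List.foldl_cons]
      refine ih (bStep name acc ns) hmt (fun x hx hp => hmax x (by simp [hx]) hp) ?_
      unfold bStep
      split_ifs with hc
      · rw [Bool.and_eq_true, startswith_iff_pMatch] at hc
        exact Or.inr ⟨ns, rfl, hc.2, hmax ns (by simp) hc.2⟩
      · exact hacc
    · -- the head is m; the step lands on some m and foldB_keep finishes
      have hns : ns = m := by
        rcases List.mem_cons.mp hmem with h | h
        · exact h.symm
        · exact absurd h hmt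
      subst hns
      have hstep : bStep name acc ns = some ns := by
        unfold bStep
        rcases hacc with h | ⟨b, hb, hpb, hlb⟩
        · subst h
          rw [if_pos]
          simp only [Bool.true_and, startswith_iff_pMatch]
          exact hm
        · subst hb
          by_cases hlt : b.toList.length < ns.toList.length
          · rw [if_pos]
            rw [Bool.and_eq_true, decide_eq_true_iff, startswith_iff_pMatch]
            refine ⟨?_, hm⟩
            simpa [PySem.Str.len_eq, String.length_toList] using hlt
          · have hbe : b = ns := huniq b hpb (by omega)
            subst hbe
            split_ifs <;> rfl
      rw [List.foldl_cons, hstep]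
      exact foldB_keep name ns rest (fun x hx hp => hmax x (by simp [hx]) hp)

-- a nonempty set of matches has a length-maximal element
theorem exists_max_match (name : String) :
    ∀ (l : List String), (∃ x ∈ l, pMatch name x) →
      ∃ m ∈ l, pMatch name m ∧ ∀ x ∈ l, pMatch name x → x.toList.length ≤ m.toList.length := by
  intro l
  induction l with
  | nil => rintro ⟨x, hx, -⟩; simp at hx
  | cons ns rest ih =>
    intro hex
    by_cases hrest : ∃ x ∈ rest, pMatch name x
    · obtain ⟨m, hmem, hpm, hmax⟩ := ih hrest
      by_cases hns : pMatch name ns ∧ m.toList.length ≤ ns.toList.length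
      · refine ⟨ns, by simp, hns.1, ?_⟩
        intro x hx hp
        rcases List.mem_cons.mp hx with h | h
        · simp [h]
        · exact le_trans (hmax x h hp) hns.2
      · refine ⟨m, by simp [hmem], hpm, ?_⟩
        intro x hx hp
        rcases List.mem_cons.mp hx with h | h
        · subst h
          by_contra hlt
          exact hns ⟨hp, by omega⟩
        · exact hmax x h hp
    · obtain ⟨x, hx, hpx⟩ := hex
      have hxns : x = ns := by
        rcases List.mem_cons.mp hx with h | h
        · exact h
        · exact absurd ⟨x, h, hpx⟩ hrest
      subst hxns
      refine ⟨x, by simp, hpx, ?_⟩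
      intro y hy hp
      rcases List.mem_cons.mp hy with h | h
      · simp [h]
      · exact absurd ⟨y, h, hp⟩ hrest

-- ===== VERDICT (by name: the statement is the Claim_ definition above) =====
theorem split_known_namespace_spec : Claim_equal_split_known_namespace := by
  intro name namespaces _
  unfold Spec_split_known_namespace split_known_namespace split_known_namespace_alt
  by_cases hex : ∃ x ∈ namespaces, pMatch name x
  · obtain ⟨m, hmem, hpm, hmax⟩ := exists_max_match name namespaces hex
    have huniq : ∀ x, pMatch name x → x.toList.length = m.toList.length → x = m :=
      fun x hx hl => pMatch_uniq hx hpm hl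
    rw [if_pos (isIn_of_pMatch hpm)]
    rw [foldB_reach name m hpm huniq namespaces none hmem hmax (Or.inl rfl)]
    rw [sknLoop_max name m hpm huniq _
      ((PySem.List.mem_sorted _ _ _ _).mpr hmem)
      (fun x hx => hmax x ((PySem.List.mem_sorted _ _ _ _).mp hx))
      (by
        have hpw := PySem.List.sorted_pairwise_rev namespaces (fun ns => PySem.Str.len ns)
        refine hpw.imp ?_
        intro a b h
        simpa [PySem.Str.len_eq, String.length_toList] using h)]
  · have hex2 : ∀ x ∈ namespaces, ¬ pMatch name x := by
      intro x hx hp; exact hex ⟨x, hx, hp⟩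
    have hB : namespaces.foldl (bStep name) none = none := foldB_none name namespaces hex2
    rw [hB]
    split_ifs with h
    · rw [sknLoop_none name _ (fun x hx => hex2 x ((PySem.List.mem_sorted _ _ _ _).mp hx))]
    · rfl
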